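-- pv_equiv track=rewrite | github.com/FrankSmith685/ProServ-Solution-Front | tools/generate_report_pdf.py | build_pdf_text_stream
-- ===== SOURCE A (Python) =====
-- PAGE_HEIGHT = 842
--
-- MARGIN_X = 50
--
-- MARGIN_Y = 50
--
-- FONT_SIZE = 11
--
-- LINE_HEIGHT = 16
--
-- def pdf_escape(text: str) -> str:
--     return text.replace('\\', '\\\\').replace('(', '\\(').replace(')', '\\)')
--
-- def build_pdf_text_stream(lines: list[str]) -> list[str]:
--     pages: list[str] = []
--     y = PAGE_HEIGHT - MARGIN_Y
--     current_page_ops = [f"BT /F1 {FONT_SIZE} Tf 1 0 0 1 {MARGIN_X} {y} Tm"]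
--
--     for line in lines:
--         if y <= MARGIN_Y + LINE_HEIGHT:
--             current_page_ops.append("ET")
--             pages.append('\n'.join(current_page_ops))
--             y = PAGE_HEIGHT - MARGIN_Y
--             current_page_ops = [f"BT /F1 {FONT_SIZE} Tf 1 0 0 1 {MARGIN_X} {y} Tm"]
--
--         safe = pdf_escape(line)
--         current_page_ops.append(f"({safe}) Tj")
--         current_page_ops.append(f"0 -{LINE_HEIGHT} Td")
--         y -= LINE_HEIGHT
--
--     current_page_ops.append("ET")
--     pages.append('\n'.join(current_page_ops))
--     return pages
-- ===== SOURCE B (Python) =====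
-- PAGE_HEIGHT = 842
-- MARGIN_X = 50
-- MARGIN_Y = 50
-- FONT_SIZE = 11
-- LINE_HEIGHT = 16
--
-- LINES_PER_PAGE = (PAGE_HEIGHT - MARGIN_Y - (MARGIN_Y + LINE_HEIGHT)) // LINE_HEIGHT + 1  # 46
--
-- def pdf_escape(text: str) -> str:
--     return text.replace('\\', '\\\\').replace('(', '\\(').replace(')', '\\)')
--
-- def _page(chunk: list[str]) -> str:
--     ops = [f"BT /F1 {FONT_SIZE} Tf 1 0 0 1 {MARGIN_X} {PAGE_HEIGHT - MARGIN_Y} Tm"]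
--     for line in chunk:
--         ops += [f"({pdf_escape(line)}) Tj", f"0 -{LINE_HEIGHT} Td"]
--     ops.append("ET")
--     return '\n'.join(ops)
--
-- def build_pdf_text_stream(lines: list[str]) -> list[str]:
--     chunks = [lines[i:i + LINES_PER_PAGE] for i in range(0, len(lines), LINES_PER_PAGE)]
--     if not chunks:
--         chunks = [[]]
--     return [_page(c) for c in chunks]
-- ===== Notes on version B (the rewrite author's own statement) =====
-- stated objective: simpler
-- what changed: Replaces A's running-y cursor with page flushes interleaved in the line loop by computing the fixed page capacity (46 lines) from the constants, partitioning the input into 46-line chunks with a range comprehension, and mapping each chunk to a page string.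
import Mathlib
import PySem

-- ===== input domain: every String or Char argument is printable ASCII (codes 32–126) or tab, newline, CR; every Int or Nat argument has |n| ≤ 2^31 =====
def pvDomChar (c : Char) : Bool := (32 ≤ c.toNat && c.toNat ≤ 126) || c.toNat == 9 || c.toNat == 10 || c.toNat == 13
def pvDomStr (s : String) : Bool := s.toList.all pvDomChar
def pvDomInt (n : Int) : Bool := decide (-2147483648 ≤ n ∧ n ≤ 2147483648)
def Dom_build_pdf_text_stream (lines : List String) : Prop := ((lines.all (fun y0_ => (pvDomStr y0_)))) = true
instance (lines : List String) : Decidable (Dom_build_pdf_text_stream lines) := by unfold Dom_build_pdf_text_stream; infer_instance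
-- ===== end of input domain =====

-- B replaces A's running-y page accumulator by computing the fixed page capacity (46 lines),
-- chunking the input up front and mapping each chunk to a page (objective: simpler decomposition).

-- ===== PORT A =====
def pdf_escape (text : String) : String :=
  PySem.Str.replace (PySem.Str.replace (PySem.Str.replace text "\\" "\\\\") "(" "\\(") ")" "\\)"

def build_pdf_text_stream (lines : List String) : List String :=
  let y0 : Int := 842 - 50
  let init : List String :=
    ["BT /F1 " ++ PySem.Int.toStr 11 ++ " Tf 1 0 0 1 " ++ PySem.Int.toStr 50 ++ " " ++ PySem.Int.toStr y0 ++ " Tm"]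
  let res := lines.foldl
    (fun (st : Int × List String × List String) line =>
      let st2 :=
        if st.1 ≤ 50 + 16 then
          let pages := st.2.2 ++ [PySem.Str.join "\n" (st.2.1 ++ ["ET"])]
          let y : Int := 842 - 50
          (y, (["BT /F1 " ++ PySem.Int.toStr 11 ++ " Tf 1 0 0 1 " ++ PySem.Int.toStr 50 ++ " " ++ PySem.Int.toStr y ++ " Tm"] : List String), pages)
        else st
      let safe := pdf_escape line
      (st2.1 - 16, st2.2.1 ++ ["(" ++ safe ++ ") Tj", "0 -" ++ PySem.Int.toStr 16 ++ " Td"], st2.2.2))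
    (y0, init, ([] : List String))
  res.2.2 ++ [PySem.Str.join "\n" (res.2.1 ++ ["ET"])]

-- ===== PORT B =====
def pdf_escape_alt (text : String) : String :=
  PySem.Str.replace (PySem.Str.replace (PySem.Str.replace text "\\" "\\\\") "(" "\\(") ")" "\\)"

def linesPerPage : Int := PySem.Int.floordiv (842 - 50 - (50 + 16)) 16 + 1

def pageAlt (chunk : List String) : String :=
  let ops := chunk.foldl
    (fun ops line => ops ++ ["(" ++ pdf_escape_alt line ++ ") Tj", "0 -" ++ PySem.Int.toStr 16 ++ " Td"])
    ["BT /F1 " ++ PySem.Int.toStr 11 ++ " Tf 1 0 0 1 " ++ PySem.Int.toStr 50 ++ " " ++ PySem.Int.toStr (842 - 50) ++ " Tm"]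
  PySem.Str.join "\n" (ops ++ ["ET"])

def build_pdf_text_stream_alt (lines : List String) : List String :=
  let chunks := (PySem.List.pyRange 0 (PySem.List.len lines) linesPerPage).map
    (fun i => PySem.List.slice lines (some i) (some (i + linesPerPage)))
  let chunks := if chunks = [] then [[]] else chunks
  chunks.map pageAlt

-- ===== PRECONDITION & SPEC =====
def Spec_build_pdf_text_stream (lines : List String) (out : List String) : Prop := out = build_pdf_text_stream_alt lines
instance (lines : List String) (out : List String) : Decidable (Spec_build_pdf_text_stream lines out) := by unfold Spec_build_pdf_text_stream; infer_instance

-- ===== CLAIM (what is proved, stated in full; the proofs are below) =====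
def Claim_equal_build_pdf_text_stream : Prop := ∀ (lines : List String), Dom_build_pdf_text_stream lines → Spec_build_pdf_text_stream lines (build_pdf_text_stream lines)

-- ===== LEMMAS AND PROOFS =====

-- the page line-lists, as the natural take/drop recursion
def chunksRec (xs : List String) : List (List String) :=
  if xs = [] then [] else xs.take 46 :: chunksRec (xs.drop 46)
termination_by xs.length
decreasing_by
  cases xs with
  | nil => simp_all
  | cons a t => simp

-- B's range comprehension produces exactly that recursion
lemma chunksB_aux (n : Nat) : ∀ xs : List String, xs.length = n →
    (List.range ((xs.length + 45) / 46)).map (fun k => (xs.drop (46 * k)).take 46)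
      = chunksRec xs := by
  induction n using Nat.strong_induction_on with
  | _ n ih =>
    intro xs hn
    cases hxs : xs with
    | nil => simp [chunksRec]
    | cons a t =>
      rw [← hxs]
      have hpos : 0 < xs.length := by rw [hxs]; simp
      have hm : (xs.length + 45) / 46 = (xs.length - 46 + 45) / 46 + 1 := by
        omega
      rw [hm, List.range_succ_eq_map, List.map_cons, List.map_map]
      rw [chunksRec, if_neg (by simp [hxs])]
      refine List.cons_eq_cons.mpr ⟨by simp, ?_⟩
      calc ((List.range ((xs.length - 46 + 45) / 46)).map
              ((fun k => (xs.drop (46 * k)).take 46) ∘ Nat.succ))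
            = (List.range ((xs.length - 46 + 45) / 46)).map
              (fun k => ((xs.drop 46).drop (46 * k)).take 46) := by
              apply List.map_congr_left
              intro k _
              simp only [Function.comp_apply, Nat.succ_eq_add_one]
              rw [List.drop_drop]
              congr 2
              ring
          _ = chunksRec (xs.drop 46) := by
              have := ih (xs.drop 46).length (by simp only [List.length_drop]; omega) (xs.drop 46) rfl
              simpa using this

lemma chunksB_eq (xs : List String) :
    (PySem.List.pyRange 0 (PySem.List.len xs) linesPerPage).map
      (fun i => PySem.List.slice xs (some i) (some (i + linesPerPage)))
    = chunksRec xs := by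
  have h46 : linesPerPage = (46 : Int) := by decide
  rw [h46, PySem.List.len_eq, PySem.List.pyRange_of_pos 0 (xs.length : Int) (by norm_num)]
  rw [List.map_map]
  rw [show (if (0:Int) < xs.length then ((((xs.length:Int)) - 0 + 46 - 1) / 46).toNat else 0)
        = (xs.length + 45) / 46 by
    split_ifs with h
    · have : ((xs.length:Int) - 0 + 46 - 1) = ((xs.length + 45 : Nat) : Int) := by push_cast; ring
      rw [this, show ((46:Int)) = ((46:Nat):Int) from rfl, ← Int.natCast_div, Int.toNat_natCast]
    · omega]
  rw [← chunksB_aux xs.length xs rfl]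
  apply List.map_congr_left
  intro k _
  simp only [Function.comp_apply]
  have : (0 : Int) + 46 * (k:Int) = ((46 * k : Nat) : Int) := by push_cast; ring
  rw [this, show ((46 * k : Nat) : Int) + 46 = ((46 * k : Nat) : Int) + ((46:Nat):Int) from rfl,
    PySem.List.slice_natCast_add]

-- shared string pieces of both ports
def emitOps (l : String) : List String :=
  ["(" ++ pdf_escape l ++ ") Tj", "0 -" ++ PySem.Int.toStr 16 ++ " Td"]

def headerStr : String :=
  "BT /F1 " ++ PySem.Int.toStr 11 ++ " Tf 1 0 0 1 " ++ PySem.Int.toStr 50 ++ " " ++ PySem.Int.toStr (842 - 50) ++ " Tm"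

-- page content of a flush, phrased on the lines of the page
def pageOf (chunk : List String) : String :=
  PySem.Str.join "\n" (headerStr :: chunk.flatMap emitOps ++ ["ET"])

-- the page line-lists A produces, starting from a partially filled page `pref`
def chunkAux (pref : List String) : List String → List (List String)
  | [] => [pref]
  | l :: ls => if pref.length = 46 then pref :: chunkAux [l] ls else chunkAux (pref ++ [l]) ls

lemma pageAlt_eq_pageOf (chunk : List String) : pageAlt chunk = pageOf chunk := by
  simp [pageAlt, pageOf, pdf_escape_alt, headerStr, List.flatMap_def]
  rfl

lemma chunkAux_eq (ls : List String) : ∀ (pref : List String), pref.length ≤ 46 →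
    chunkAux pref ls = (pref ++ ls.take (46 - pref.length)) :: chunksRec (ls.drop (46 - pref.length)) := by
  induction ls with
  | nil =>
    intro pref _
    simp [chunkAux, chunksRec]
  | cons l r ih =>
    intro pref hle
    by_cases h46 : pref.length = 46
    · have h1 : ([l] : List String).length ≤ 46 := by simp
      rw [chunkAux, if_pos h46, ih [l] h1, h46]
      have hcons : chunksRec (l :: r) = (l :: r).take 46 :: chunksRec ((l :: r).drop 46) := by
        rw [chunksRec, if_neg (by simp)]
      simp [hcons, List.take_succ_cons, List.drop_succ_cons]
    · have hlt : pref.length < 46 := lt_of_le_of_ne hle h46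
      rw [chunkAux, if_neg h46, ih (pref ++ [l]) (by simp; omega)]
      have hk : 46 - pref.length = (46 - (pref ++ [l]).length) + 1 := by simp; omega
      rw [hk]
      simp [List.take_succ_cons, List.drop_succ_cons]

-- A's loop body and final flush, named so the invariant lemma stays readable
def stepA (st : Int × List String × List String) (line : String) : Int × List String × List String :=
  let st2 :=
    if st.1 ≤ 50 + 16 then
      let pages := st.2.2 ++ [PySem.Str.join "\n" (st.2.1 ++ ["ET"])]
      let y : Int := 842 - 50
      (y, (["BT /F1 " ++ PySem.Int.toStr 11 ++ " Tf 1 0 0 1 " ++ PySem.Int.toStr 50 ++ " " ++ PySem.Int.toStr y ++ " Tm"] : List String), pages)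
    else st
  let safe := pdf_escape line
  (st2.1 - 16, st2.2.1 ++ ["(" ++ safe ++ ") Tj", "0 -" ++ PySem.Int.toStr 16 ++ " Td"], st2.2.2)

def finA (st : Int × List String × List String) : List String :=
  st.2.2 ++ [PySem.Str.join "\n" (st.2.1 ++ ["ET"])]

lemma build_eq_stepA (lines : List String) :
    build_pdf_text_stream lines = finA (lines.foldl stepA (842 - 50, [headerStr], [])) := rfl

lemma stepA_flush (y : Int) (ops pages : List String) (l : String) (h : y ≤ 50 + 16) :
    stepA (y, ops, pages) l
      = (842 - 50 - 16, headerStr :: emitOps l, pages ++ [PySem.Str.join "\n" (ops ++ ["ET"])]) := by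
  have h' : y ≤ 66 := by linarith
  simp [stepA, headerStr, emitOps, h']

lemma stepA_go (y : Int) (ops pages : List String) (l : String) (h : ¬ y ≤ 50 + 16) :
    stepA (y, ops, pages) l = (y - 16, ops ++ emitOps l, pages) := by
  have h' : ¬ y ≤ 66 := by omega
  simp [stepA, emitOps, h']

-- A's loop, starting on a page already holding `pref` (so y = 792 - 16·|pref|), flushes exactly
-- the pages chunkAux pref describes.
lemma foldA_eq (ls : List String) : ∀ (pref pages : List String), pref.length ≤ 46 →
    finA (ls.foldl stepA (842 - 50 - 16 * pref.length, headerStr :: pref.flatMap emitOps, pages))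
      = pages ++ (chunkAux pref ls).map pageOf := by
  induction ls with
  | nil =>
    intro pref pages _
    simp [finA, chunkAux, pageOf]
  | cons l r ih =>
    intro pref pages hle
    by_cases h46 : pref.length = 46
    · have hy : (842 - 50 : Int) - 16 * pref.length ≤ 50 + 16 := by rw [h46]; norm_num
      rw [List.foldl_cons, stepA_flush _ _ _ _ hy]
      have e1 : (842 - 50 - 16 : Int) = 842 - 50 - 16 * (([l] : List String).length : Int) := by
        simp
      have e2 : headerStr :: emitOps l = headerStr :: ([l] : List String).flatMap emitOps := by
        simp
      rw [e1, e2, ih [l] _ (by simp)]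
      rw [chunkAux, if_pos h46]
      simp [pageOf]
    · have hlt : pref.length < 46 := lt_of_le_of_ne hle h46
      have hy : ¬ ((842 - 50 : Int) - 16 * pref.length ≤ 50 + 16) := by
        have : (pref.length : Int) < 46 := by exact_mod_cast hlt
        omega
      rw [List.foldl_cons, stepA_go _ _ _ _ hy]
      have e1 : (842 - 50 : Int) - 16 * pref.length - 16
          = 842 - 50 - 16 * (((pref ++ [l]).length : Nat) : Int) := by
        simp only [List.length_append, List.length_cons, List.length_nil]
        push_cast
        ring
      have e2 : (headerStr :: pref.flatMap emitOps) ++ emitOps l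
          = headerStr :: (pref ++ [l]).flatMap emitOps := by
        simp
      rw [e1, e2, ih (pref ++ [l]) _ (by simp; omega)]
      rw [chunkAux, if_neg h46]

-- ===== VERDICT (by name: the statement is the Claim_ definition above) =====
theorem build_pdf_text_stream_spec : Claim_equal_build_pdf_text_stream := by
  intro lines _
  show build_pdf_text_stream lines = build_pdf_text_stream_alt lines
  rw [build_eq_stepA]
  have hA := foldA_eq lines [] [] (by norm_num)
  simp only [List.length_nil, Nat.cast_zero, mul_zero, sub_zero, List.flatMap_nil,
    List.nil_append] at hA
  rw [hA, chunkAux_eq lines [] (by norm_num)]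
  rw [build_pdf_text_stream_alt]
  simp only [chunksB_eq]
  cases lines with
  | nil =>
    simp [chunksRec, pageAlt_eq_pageOf]
  | cons a t =>
    have hc : chunksRec (a :: t) = (a :: t).take 46 :: chunksRec ((a :: t).drop 46) := by
      rw [chunksRec, if_neg (by simp)]
    simp [hc, pageAlt_eq_pageOf]
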